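-- pv_equiv track=rewrite | github.com/Firmfox/Proxify | app/main.py | clean_proxy_line
-- ===== SOURCE A (Python) =====
-- def clean_proxy_line(line):
--     line = line.strip()
--     prefixes = ['socks5://', 'socks4://', 'http://', 'https://']
--     for prefix in prefixes:
--         if line.startswith(prefix):
--             line = line[len(prefix):]
--             break
--     return line
-- ===== SOURCE B (Python) =====
-- def clean_proxy_line(line):
--     line = line.strip()
--     idx = line.find('://')
--     if idx != -1 and line[:idx] in {'socks5', 'socks4', 'http', 'https'}:
--         return line[idx + 3:]
--     return line
-- ===== Notes on version B (the rewrite author's own statement) =====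
-- stated objective: idiomatic
-- what changed: Instead of looping over the four full scheme prefixes calling startswith, B locates the first scheme separator once with str.find and does a single set-membership test on the text before it, slicing past the separator if it is a known scheme.
import Mathlib
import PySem

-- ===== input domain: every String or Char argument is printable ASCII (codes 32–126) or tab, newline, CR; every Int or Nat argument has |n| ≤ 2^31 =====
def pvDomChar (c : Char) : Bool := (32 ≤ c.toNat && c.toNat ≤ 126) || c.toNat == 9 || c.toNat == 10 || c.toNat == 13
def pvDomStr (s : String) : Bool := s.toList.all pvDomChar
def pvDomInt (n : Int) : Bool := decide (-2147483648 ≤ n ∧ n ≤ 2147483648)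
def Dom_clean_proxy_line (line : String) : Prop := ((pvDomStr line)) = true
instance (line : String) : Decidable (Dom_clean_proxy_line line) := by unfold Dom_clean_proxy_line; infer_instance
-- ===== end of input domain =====

-- B strips the line, locates the first '://' once with find, and strips the scheme by a single
-- set-membership test instead of A's loop over four prefixes with startswith (objective: idiomatic).

-- ===== PORT A =====
-- the for-loop over prefixes with break: first matching prefix is removed
def cplLoop (line : String) (prefixes : List String) : String :=
  match prefixes with
  | [] => line
  | p :: rest =>
    if PySem.Str.startswith line p then
      PySem.Str.slice line (some (PySem.Str.len p)) none
    else cplLoop line rest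

def clean_proxy_line (line : String) : String :=
  let line := PySem.Str.strip line
  cplLoop line ["socks5://", "socks4://", "http://", "https://"]

-- ===== PORT B =====
def clean_proxy_line_alt (line : String) : String :=
  let line := PySem.Str.strip line
  let idx := PySem.Str.find line "://"
  if idx ≠ -1 ∧ PySem.Str.slice line none (some idx) ∈ PySem.Set.ofList ["socks5", "socks4", "http", "https"] then
    PySem.Str.slice line (some (idx + 3)) none
  else line

-- ===== PRECONDITION & SPEC =====
def Spec_clean_proxy_line (line : String) (out : String) : Prop := out = clean_proxy_line_alt line
instance (line : String) (out : String) : Decidable (Spec_clean_proxy_line line out) := by unfold Spec_clean_proxy_line; infer_instance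

-- ===== CLAIM (what is proved, stated in full; the proofs are below) =====
def Claim_equal_clean_proxy_line : Prop := ∀ (line : String), Dom_clean_proxy_line line → Spec_clean_proxy_line line (clean_proxy_line line)

-- ===== LEMMAS AND PROOFS =====

-- if s starts with sch ++ "://" and sch contains no ':', the FIRST '://' sits exactly after sch
lemma find_of_scheme_prefix (s sch : String) (hp : ':' ∉ sch.toList)
    (h : PySem.Str.startswith s (sch ++ "://") = true) :
    PySem.Str.find s "://" = (sch.toList.length : Int) ∧
    PySem.Str.slice s none (some (sch.toList.length : Int)) = sch := by
  rw [PySem.Str.startswith_eq, PySem.Chars.startswith_iff] at h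
  rw [String.toList_append] at h
  obtain ⟨t, ht⟩ := h
  have hinf : "://".toList <:+: s.toList := by
    refine ⟨sch.toList, t, ?_⟩
    simpa using ht
  have hne : PySem.Chars.find s.toList "://".toList ≠ -1 :=
    (PySem.Chars.find_ne_neg_one_iff s.toList "://".toList).2 hinf
  have h0 : 0 ≤ PySem.Chars.find s.toList "://".toList :=
    (PySem.Chars.find_nonneg_iff s.toList "://".toList).2 hinf
  obtain ⟨hocc, hmin⟩ := PySem.Chars.find_spec h0
  set f := PySem.Chars.find s.toList "://".toList with hf
  have hoccp : "://".toList <+: s.toList.drop sch.toList.length := by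
    refine ⟨t, ?_⟩
    rw [← ht, List.append_assoc]
    simp
  have hle : f.toNat ≤ sch.toList.length := by
    by_contra hgt
    exact hmin sch.toList.length (by omega) hoccp
  have hnlt : ¬ f.toNat < sch.toList.length := by
    intro hlt
    obtain ⟨u, hu⟩ := hocc
    have hcol : s.toList[f.toNat]? = some ':' := by
      have : (s.toList.drop f.toNat)[0]? = some ':' := by rw [← hu]; rfl
      simpa [List.getElem?_drop] using this
    have hsch : s.toList[f.toNat]? = some (sch.toList[f.toNat]) := by
      rw [← ht, List.append_assoc, List.getElem?_append_left hlt]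
      simp
    rw [hsch] at hcol
    have hcc : sch.toList[f.toNat] = ':' := by simpa using hcol
    exact hp (hcc ▸ List.getElem_mem hlt)
  have hfn : f.toNat = sch.toList.length := by omega
  have hfeq : f = (sch.toList.length : Int) := by omega
  constructor
  · rw [PySem.Str.find_eq]; exact hfeq
  · apply String.ext
    rw [PySem.Str.toList_slice, PySem.Chars.slice_eq_listSlice,
        PySem.List.slice_to _ (by positivity)]
    simp only [Int.toNat_natCast]
    rw [← ht, List.append_assoc]
    simp

-- conversely, if B's test fires with scheme sch, then s starts with sch ++ "://"
lemma prefix_of_find (s sch : String) (hne : PySem.Str.find s "://" ≠ -1)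
    (hsl : PySem.Str.slice s none (some (PySem.Str.find s "://")) = sch) :
    PySem.Str.startswith s (sch ++ "://") = true := by
  rw [PySem.Str.find_eq] at hne hsl
  have h0 : 0 ≤ PySem.Chars.find s.toList "://".toList := by
    have := PySem.Chars.neg_one_le_find s.toList "://".toList
    omega
  obtain ⟨hocc, _⟩ := PySem.Chars.find_spec h0
  set f := PySem.Chars.find s.toList "://".toList with hf
  have htake : s.toList.take f.toNat = sch.toList := by
    have := congrArg String.toList hsl
    rwa [PySem.Str.toList_slice, PySem.Chars.slice_eq_listSlice,
        PySem.List.slice_to _ h0] at this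
  obtain ⟨u, hu⟩ := hocc
  rw [PySem.Str.startswith_eq, PySem.Chars.startswith_iff, String.toList_append]
  refine ⟨u, ?_⟩
  calc sch.toList ++ "://".toList ++ u
      = s.toList.take f.toNat ++ (s.toList.drop f.toNat) := by rw [htake, ← hu]; simp
    _ = s.toList := by simp

lemma core (s : String) :
    cplLoop s ["socks5://", "socks4://", "http://", "https://"] =
      (if PySem.Str.find s "://" ≠ -1 ∧
          PySem.Str.slice s none (some (PySem.Str.find s "://")) ∈
            PySem.Set.ofList ["socks5", "socks4", "http", "https"] then
        PySem.Str.slice s (some (PySem.Str.find s "://" + 3)) none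
      else s) := by
  have hmem : ∀ x : String, x ∈ PySem.Set.ofList ["socks5", "socks4", "http", "https"] ↔
      (x = "socks5" ∨ x = "socks4" ∨ x = "http" ∨ x = "https") := by
    intro x
    rw [PySem.Set.mem_ofList]
    simp
  simp only [cplLoop]
  by_cases h1 : PySem.Str.startswith s "socks5://" = true
  · rw [if_pos h1]
    obtain ⟨hfind, hslice⟩ := find_of_scheme_prefix s "socks5" (by decide)
      (by rwa [show ("socks5" ++ "://" : String) = "socks5://" by decide])
    rw [if_pos ⟨by rw [hfind]; decide, by rw [hfind]; exact (hmem _).2 (Or.inl hslice)⟩]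
    rw [hfind, show ((("socks5".toList.length : Int)) + 3) = PySem.Str.len "socks5://" by decide]
  · rw [if_neg h1]
    by_cases h2 : PySem.Str.startswith s "socks4://" = true
    · rw [if_pos h2]
      obtain ⟨hfind, hslice⟩ := find_of_scheme_prefix s "socks4" (by decide)
        (by rwa [show ("socks4" ++ "://" : String) = "socks4://" by decide])
      rw [if_pos ⟨by rw [hfind]; decide, by rw [hfind]; exact (hmem _).2 ((Or.inr ∘ Or.inl) hslice)⟩]
      rw [hfind, show ((("socks4".toList.length : Int)) + 3) = PySem.Str.len "socks4://" by decide]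
    · rw [if_neg h2]
      by_cases h3 : PySem.Str.startswith s "http://" = true
      · rw [if_pos h3]
        obtain ⟨hfind, hslice⟩ := find_of_scheme_prefix s "http" (by decide)
          (by rwa [show ("http" ++ "://" : String) = "http://" by decide])
        rw [if_pos ⟨by rw [hfind]; decide, by rw [hfind]; exact (hmem _).2 ((Or.inr ∘ Or.inr ∘ Or.inl) hslice)⟩]
        rw [hfind, show ((("http".toList.length : Int)) + 3) = PySem.Str.len "http://" by decide]
      · rw [if_neg h3]
        by_cases h4 : PySem.Str.startswith s "https://" = true
        · rw [if_pos h4]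
          obtain ⟨hfind, hslice⟩ := find_of_scheme_prefix s "https" (by decide)
            (by rwa [show ("https" ++ "://" : String) = "https://" by decide])
          rw [if_pos ⟨by rw [hfind]; decide, by rw [hfind]; exact (hmem _).2 ((Or.inr ∘ Or.inr ∘ Or.inr) hslice)⟩]
          rw [hfind, show ((("https".toList.length : Int)) + 3) = PySem.Str.len "https://" by decide]
        · rw [if_neg h4]
          rw [if_neg]
          rintro ⟨hne, hin⟩
          rcases (hmem _).1 hin with h | h | h | h
          · exact h1 (by rw [show ("socks5://" : String) = "socks5" ++ "://" by decide]; exact prefix_of_find s "socks5" hne h)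
          · exact h2 (by rw [show ("socks4://" : String) = "socks4" ++ "://" by decide]; exact prefix_of_find s "socks4" hne h)
          · exact h3 (by rw [show ("http://" : String) = "http" ++ "://" by decide]; exact prefix_of_find s "http" hne h)
          · exact h4 (by rw [show ("https://" : String) = "https" ++ "://" by decide]; exact prefix_of_find s "https" hne h)

-- ===== VERDICT (by name: the statement is the Claim_ definition above) =====
theorem clean_proxy_line_spec : Claim_equal_clean_proxy_line := by
  intro line _
  unfold Spec_clean_proxy_line clean_proxy_line clean_proxy_line_alt
  exact core (PySem.Str.strip line)
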